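-- pv_equiv track=rewrite | github.com/liquibase-examples/gha-cd-bagelstore-demo | scripts/harness/search-harness-api.py | search_paths
-- ===== SOURCE A (Python) =====
-- def search_paths(spec, query):
--     """Search for paths matching the query"""
--     query_terms = [term.lower() for term in query.split()]
--     matches = []
--
--     for path, methods in spec['paths'].items():
--         path_lower = path.lower()
--
--         # Get method details for searching
--         search_text = path_lower
--         for method, details in methods.items():
--             if method in ['get', 'post', 'put', 'delete', 'patch']:
--                 summary = details.get('summary', '').lower()
--                 description = details.get('description', '').lower()
--                 operation_id = details.get('operationId', '').lower()
--                 search_text += ' ' + summary + ' ' + description + ' ' + operation_id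
--
--         # Check if all query terms are present
--         if all(term in search_text for term in query_terms):
--             matches.append((path, methods, 'matched'))
--
--     return matches
-- ===== SOURCE B (Python) =====
-- _METHODS = ('get', 'post', 'put', 'delete', 'patch')
-- _KEYS = ('summary', 'description', 'operationId')
--
--
-- def _fields(path, methods):
--     """Collect the lowercased searchable fields of one path entry."""
--     fields = [path.lower()]
--     for method, details in methods.items():
--         if method in _METHODS:
--             for key in _KEYS:
--                 fields.append(details.get(key, '').lower())
--     return fields
--
--
-- def _hits_all(terms, path, methods):
--     fields = _fields(path, methods)
--     return all(any(term in field for field in fields) for term in terms)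
--
--
-- def search_paths(spec, query):
--     """Search for paths matching the query"""
--     terms = [term.lower() for term in query.split()]
--     return [(path, methods, 'matched')
--             for path, methods in spec['paths'].items()
--             if _hits_all(terms, path, methods)]
-- ===== Notes on version B (the rewrite author's own statement) =====
-- stated objective: alternative
-- what changed: B collects each path's lowercased searchable strings into a field list and keeps the path when every query term occurs in some field (nested any/all via helper functions and a comprehension), instead of A's flat substring scan over one space-concatenated search_text; equal because split() terms contain no whitespace, so no term can span the space-joined field boundary.
import Mathlib
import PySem

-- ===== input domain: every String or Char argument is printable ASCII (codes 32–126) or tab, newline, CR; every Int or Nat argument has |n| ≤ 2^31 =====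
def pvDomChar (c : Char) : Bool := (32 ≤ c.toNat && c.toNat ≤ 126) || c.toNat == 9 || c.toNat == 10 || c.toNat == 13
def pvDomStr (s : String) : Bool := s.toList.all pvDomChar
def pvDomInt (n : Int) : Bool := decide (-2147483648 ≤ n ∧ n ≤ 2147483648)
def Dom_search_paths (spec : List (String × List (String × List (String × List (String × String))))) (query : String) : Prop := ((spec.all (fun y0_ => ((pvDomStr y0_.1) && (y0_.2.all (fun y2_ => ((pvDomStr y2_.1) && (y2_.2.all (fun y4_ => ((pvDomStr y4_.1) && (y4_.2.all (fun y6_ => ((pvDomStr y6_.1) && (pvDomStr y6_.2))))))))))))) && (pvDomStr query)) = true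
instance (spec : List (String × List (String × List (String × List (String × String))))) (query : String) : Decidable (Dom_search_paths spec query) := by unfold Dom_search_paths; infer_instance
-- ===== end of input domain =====

-- ===== PORT A =====
-- B differs from A only in decomposition: a per-field any/all scan instead of one concatenated search_text (same matches, same order).
-- Shared transliteration of Python dict lookup on an association list (first match).
def dget? {a : Type} (d : List (String × a)) (k : String) : Option a :=
  match d with
  | [] => none
  | (k', v) :: t => if k' = k then some v else dget? t k

def dgetD {a : Type} (d : List (String × a)) (k : String) (dflt : a) : a :=
  (dget? d k).getD dflt

-- Port of A: build one space-joined search_text per path, then scan it for every term.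
def search_paths (spec : List (String × List (String × List (String × List (String × String))))) (query : String) : List (String × (List (String × List (String × String))) × String) :=
  let query_terms := (PySem.Chars.split₀ query.toList).map PySem.Chars.lower
  match dget? spec "paths" with
  | none => []  -- unreachable under Pre_search_paths (Python raises KeyError)
  | some paths =>
    paths.foldl (fun ms pm =>
      let path := pm.1
      let methods := pm.2
      let path_lower := PySem.Chars.lower path.toList
      let search_text := methods.foldl (fun st md =>
        if md.1 ∈ (["get", "post", "put", "delete", "patch"] : List String) then
          let summary := PySem.Chars.lower (dgetD md.2 "summary" "").toList
          let description := PySem.Chars.lower (dgetD md.2 "description" "").toList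
          let operation_id := PySem.Chars.lower (dgetD md.2 "operationId" "").toList
          st ++ ' ' :: summary ++ ' ' :: description ++ ' ' :: operation_id
        else st) path_lower
      if query_terms.all (fun term => PySem.Chars.isIn term search_text) then
        ms ++ [(path, methods, "matched")]
      else ms) []

-- ===== PORT B =====
-- Port of B: the list of lowercased fields of one path entry (Source B's _fields).
def pvFields (path : String) (methods : List (String × List (String × String))) : List (List Char) :=
  methods.foldl (fun fields md =>
    if md.1 ∈ (["get", "post", "put", "delete", "patch"] : List String) then
      (["summary", "description", "operationId"] : List String).foldl
        (fun fields2 key => fields2 ++ [PySem.Chars.lower (dgetD md.2 key "").toList]) fields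
    else fields) [PySem.Chars.lower path.toList]

-- Source B's _hits_all: every term occurs in some field.
def pvHitsAll (terms : List (List Char)) (path : String) (methods : List (String × List (String × String))) : Bool :=
  terms.all (fun term => (pvFields path methods).any (fun field => PySem.Chars.isIn term field))

def search_paths_alt (spec : List (String × List (String × List (String × List (String × String))))) (query : String) : List (String × (List (String × List (String × String))) × String) :=
  let terms := (PySem.Chars.split₀ query.toList).map PySem.Chars.lower
  match dget? spec "paths" with
  | none => []  -- unreachable under Pre_search_paths (Python raises KeyError)
  | some paths =>
    (paths.filter (fun pm => pvHitsAll terms pm.1 pm.2)).map (fun pm => (pm.1, pm.2, "matched"))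

-- ===== PRECONDITION & SPEC =====
-- Pre_ excludes exactly the inputs where Python A raises KeyError: spec without a "paths" key (B raises there too).
def Pre_search_paths (spec : List (String × List (String × List (String × List (String × String))))) (query : String) : Prop :=
  "paths" ∈ spec.map Prod.fst
instance (spec : List (String × List (String × List (String × List (String × String))))) (query : String) : Decidable (Pre_search_paths spec query) := by unfold Pre_search_paths; infer_instance

def pvWitness_search_paths : (List (String × List (String × List (String × List (String × String))))) × String :=
  ([("paths", [("/pets", [("get", [("summary", "List pets")])])])], "pets")

def Spec_search_paths (spec : List (String × List (String × List (String × List (String × String))))) (query : String) (out : List (String × (List (String × List (String × String))) × String)) : Prop := out = search_paths_alt spec query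
instance (spec : List (String × List (String × List (String × List (String × String))))) (query : String) (out : List (String × (List (String × List (String × String))) × String)) : Decidable (Spec_search_paths spec query out) := by
  unfold Spec_search_paths
  haveI d1 : DecidableEq (List (String × String)) := inferInstance
  haveI d2 : DecidableEq (List (String × List (String × String))) := inferInstance
  haveI d3 : DecidableEq ((List (String × List (String × String))) × String) := inferInstance
  haveI d4 : DecidableEq (String × (List (String × List (String × String))) × String) := inferInstance
  haveI d5 : DecidableEq (List (String × (List (String × List (String × String))) × String)) := inferInstance
  infer_instance

-- ===== CLAIM (what is proved, stated in full; the proofs are below) =====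
def Claim_equal_search_paths : Prop := ∀ (spec : List (String × List (String × List (String × List (String × String))))) (query : String), Dom_search_paths spec query → Pre_search_paths spec query → Spec_search_paths spec query (search_paths spec query)

-- ===== LEMMAS AND PROOFS =====

-- If t contains no space, a prefix of a ++ ' ' :: b cannot reach the space, so it is a prefix of a.
theorem pv_prefix_of_prefix_append_space (t a b : List Char) (h : ' ' ∉ t) :
    t <+: a ++ ' ' :: b → t <+: a := by
  induction a generalizing t with
  | nil =>
    intro hp
    cases t with
    | nil => exact List.nil_prefix
    | cons x xs =>
      rw [List.nil_append, List.cons_prefix_cons] at hp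
      exact absurd (hp.1 ▸ List.mem_cons_self) h
  | cons y a ih =>
    intro hp
    cases t with
    | nil => exact List.nil_prefix
    | cons x xs =>
      rw [List.cons_append, List.cons_prefix_cons] at hp
      rw [List.cons_prefix_cons]
      exact ⟨hp.1, ih xs (fun hm => h (List.mem_cons_of_mem x hm)) hp.2⟩

-- A space-free t is a substring of a ++ ' ' :: b iff it is a substring of a or of b.
theorem pv_infix_append_space (t a b : List Char) (h : ' ' ∉ t) :
    t <:+: a ++ ' ' :: b ↔ t <:+: a ∨ t <:+: b := by
  induction a with
  | nil =>
    rw [List.nil_append, List.infix_cons_iff]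
    constructor
    · rintro (hp | hi)
      · cases t with
        | nil => exact Or.inl List.nil_infix
        | cons x xs =>
          rw [List.cons_prefix_cons] at hp
          exact absurd (hp.1 ▸ List.mem_cons_self) h
      · exact Or.inr hi
    · rintro (hi | hi)
      · rw [List.infix_nil] at hi
        exact Or.inr (hi ▸ List.nil_infix)
      · exact Or.inr hi
  | cons y a ih =>
    rw [List.cons_append, List.infix_cons_iff, ih, List.infix_cons_iff]
    constructor
    · rintro (hp | hi | hi)
      · exact Or.inl (Or.inl (pv_prefix_of_prefix_append_space t (y :: a) b h hp))
      · exact Or.inl (Or.inr hi)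
      · exact Or.inr hi
    · rintro ((hp | hi) | hi)
      · exact Or.inl (hp.trans (List.prefix_append (y :: a) (' ' :: b)))
      · exact Or.inr (Or.inl hi)
      · exact Or.inr (Or.inr hi)

-- Iterated version: substring of a ++ flatten of space-prefixed fields.
theorem pv_infix_glue (t : List Char) (h : ' ' ∉ t) (bs : List (List Char)) (a : List Char) :
    t <:+: a ++ bs.flatMap (fun x => ' ' :: x) ↔ t <:+: a ∨ ∃ b ∈ bs, t <:+: b := by
  induction bs generalizing a with
  | nil => simp
  | cons b bs ih =>
    have : a ++ (b :: bs).flatMap (fun x => ' ' :: x)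
        = a ++ ' ' :: (b ++ bs.flatMap (fun x => ' ' :: x)) := by simp
    rw [this, pv_infix_append_space t a _ h, ih b]
    simp only [List.mem_cons]
    constructor
    · rintro (hi | hi | ⟨w, hw, hi⟩)
      · exact Or.inl hi
      · exact Or.inr ⟨b, Or.inl rfl, hi⟩
      · exact Or.inr ⟨w, Or.inr hw, hi⟩
    · rintro (hi | ⟨w, (rfl | hw), hi⟩)
      · exact Or.inl hi
      · exact Or.inr (Or.inl hi)
      · exact Or.inr (Or.inr ⟨w, hw, hi⟩)

-- B's inner fold only appends on the right, so a head element can be pulled out.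
theorem pv_fields_fold_cons (methods : List (String × List (String × String))) (x : List Char) (fs : List (List Char)) :
    methods.foldl (fun fields md =>
      if md.1 ∈ (["get", "post", "put", "delete", "patch"] : List String) then
        (["summary", "description", "operationId"] : List String).foldl
          (fun fields2 key => fields2 ++ [PySem.Chars.lower (dgetD md.2 key "").toList]) fields
      else fields) (x :: fs)
    = x :: methods.foldl (fun fields md =>
      if md.1 ∈ (["get", "post", "put", "delete", "patch"] : List String) then
        (["summary", "description", "operationId"] : List String).foldl
          (fun fields2 key => fields2 ++ [PySem.Chars.lower (dgetD md.2 key "").toList]) fields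
      else fields) fs := by
  induction methods generalizing fs with
  | nil => rfl
  | cons md methods ih =>
    simp only [List.foldl]
    by_cases hm : md.1 ∈ (["get", "post", "put", "delete", "patch"] : List String)
    · simp only [if_pos hm, List.cons_append]
      exact ih _
    · simp only [if_neg hm]
      exact ih fs

-- A's search_text is the fields glued with single spaces: the two inner folds run in lock step.
theorem pv_text_eq_glue (methods : List (String × List (String × String))) (a : List Char) (fs : List (List Char)) :
    methods.foldl (fun st md =>
      if md.1 ∈ (["get", "post", "put", "delete", "patch"] : List String) then
        st ++ ' ' :: PySem.Chars.lower (dgetD md.2 "summary" "").toList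
           ++ ' ' :: PySem.Chars.lower (dgetD md.2 "description" "").toList
           ++ ' ' :: PySem.Chars.lower (dgetD md.2 "operationId" "").toList
      else st) (a ++ fs.flatMap (fun x => ' ' :: x))
    = a ++ (methods.foldl (fun fields md =>
        if md.1 ∈ (["get", "post", "put", "delete", "patch"] : List String) then
          (["summary", "description", "operationId"] : List String).foldl
            (fun fields2 key => fields2 ++ [PySem.Chars.lower (dgetD md.2 key "").toList]) fields
        else fields) fs).flatMap (fun x => ' ' :: x) := by
  induction methods generalizing fs with
  | nil => rfl
  | cons md methods ih =>
    simp only [List.foldl_cons]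
    by_cases hm : md.1 ∈ (["get", "post", "put", "delete", "patch"] : List String)
    · simp only [if_pos hm]
      rw [show a ++ fs.flatMap (fun x => ' ' :: x)
            ++ ' ' :: PySem.Chars.lower (dgetD md.2 "summary" "").toList
            ++ ' ' :: PySem.Chars.lower (dgetD md.2 "description" "").toList
            ++ ' ' :: PySem.Chars.lower (dgetD md.2 "operationId" "").toList
          = a ++ (fs ++ [PySem.Chars.lower (dgetD md.2 "summary" "").toList]
                     ++ [PySem.Chars.lower (dgetD md.2 "description" "").toList]
                     ++ [PySem.Chars.lower (dgetD md.2 "operationId" "").toList]).flatMap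
              (fun x => ' ' :: x) by simp]
      exact ih _
    · simp only [if_neg hm]
      exact ih fs

-- lowerChar maps only uppercase letters; it never produces a space from a non-space.
theorem pv_lowerChar_eq_space (c : Char) (h : PySem.Chars.lowerChar c = ' ') : c = ' ' := by
  unfold PySem.Chars.lowerChar at h
  by_cases hu : PySem.Chars.isupper c = true
  · rw [if_pos hu] at h
    unfold PySem.Chars.isupper at hu
    simp only [Bool.and_eq_true, decide_eq_true_eq] at hu
    have h1 : 'A'.toNat ≤ c.toNat := Fin.mk_le_mk.mp hu.1
    have h2 : c.toNat ≤ 'Z'.toNat := Fin.mk_le_mk.mp hu.2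
    have hA : 'A'.toNat = 65 := by decide
    have hZ : 'Z'.toNat = 90 := by decide
    have hv : Nat.isValidChar (c.toNat + 32) := Or.inl (by omega)
    have hnat : (Char.ofNat (c.toNat + 32)).toNat = c.toNat + 32 := by
      unfold Char.ofNat
      rw [dif_pos hv]
      exact Char.toNat_ofNatAux hv
    have : (Char.ofNat (c.toNat + 32)).toNat = ' '.toNat := by rw [h]
    rw [hnat] at this
    have hsp : ' '.toNat = 32 := by decide
    omega
  · rw [if_neg hu] at h
    exact h

-- Words produced by split() contain no whitespace character.
theorem pv_split₀_go_no_space (s cur : List Char) (acc : List (List Char))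
    (hcur : ∀ c ∈ cur, PySem.Chars.isspace c = false)
    (hacc : ∀ w ∈ acc, ∀ c ∈ w, PySem.Chars.isspace c = false) :
    ∀ w ∈ PySem.Chars.split₀.go s cur acc, ∀ c ∈ w, PySem.Chars.isspace c = false := by
  induction s generalizing cur acc with
  | nil =>
    intro w hw
    unfold PySem.Chars.split₀.go at hw
    by_cases he : cur.isEmpty = true
    · rw [if_pos he, List.mem_reverse] at hw
      exact hacc w hw
    · rw [if_neg he, List.mem_reverse, List.mem_cons] at hw
      rcases hw with rfl | hw
      · intro c hc
        exact hcur c (List.mem_reverse.mp hc)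
      · exact hacc w hw
  | cons c rest ih =>
    intro w hw
    unfold PySem.Chars.split₀.go at hw
    by_cases hs : PySem.Chars.isspace c = true
    · rw [if_pos hs] at hw
      by_cases he : cur.isEmpty = true
      · rw [if_pos he] at hw
        exact ih [] acc (by simp) hacc w hw
      · rw [if_neg he] at hw
        refine ih [] _ (by simp) ?_ w hw
        intro v hv d hd
        rcases List.mem_cons.mp hv with rfl | hv
        · exact hcur d (List.mem_reverse.mp hd)
        · exact hacc v hv d hd
    · rw [if_neg hs] at hw
      refine ih (c :: cur) acc ?_ hacc w hw
      intro d hd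
      rcases List.mem_cons.mp hd with rfl | hd
      · exact Bool.eq_false_iff.mpr hs
      · exact hcur d hd

theorem pv_terms_no_space (query : String) :
    ∀ t ∈ (PySem.Chars.split₀ query.toList).map PySem.Chars.lower, ' ' ∉ t := by
  intro t ht hsp
  rcases List.mem_map.mp ht with ⟨w, hw, rfl⟩
  rcases List.mem_map.mp hsp with ⟨c, hc, hlc⟩
  have hcsp : PySem.Chars.isspace c = false := by
    have := pv_split₀_go_no_space query.toList [] [] (by simp) (by simp)
    exact this w hw c hc
  have : c = ' ' := pv_lowerChar_eq_space c hlc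
  rw [this] at hcsp
  exact absurd hcsp (by decide)

theorem pv_all_congr_mem {α : Type} (l : List α) (p q : α → Bool) (h : ∀ x ∈ l, p x = q x) :
    l.all p = l.all q := by
  induction l with
  | nil => rfl
  | cons x xs ih =>
    simp only [List.all_cons]
    rw [h x List.mem_cons_self, ih (fun y hy => h y (List.mem_cons_of_mem x hy))]

-- The per-path predicates of A and B agree: flat scan over the glued text = nested any over the fields.
theorem pv_pred_eq (terms : List (List Char)) (hterms : ∀ t ∈ terms, ' ' ∉ t)
    (path : String) (methods : List (String × List (String × String))) :
    terms.all (fun term => PySem.Chars.isIn term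
      (methods.foldl (fun st md =>
        if md.1 ∈ (["get", "post", "put", "delete", "patch"] : List String) then
          st ++ ' ' :: PySem.Chars.lower (dgetD md.2 "summary" "").toList
             ++ ' ' :: PySem.Chars.lower (dgetD md.2 "description" "").toList
             ++ ' ' :: PySem.Chars.lower (dgetD md.2 "operationId" "").toList
        else st) (PySem.Chars.lower path.toList)))
    = pvHitsAll terms path methods := by
  unfold pvHitsAll pvFields
  rw [pv_fields_fold_cons]
  refine pv_all_congr_mem _ _ _ (fun t ht => ?_)
  rw [Bool.eq_iff_iff, PySem.Chars.isIn_iff_infix, List.any_eq_true]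
  have htext := pv_text_eq_glue methods (PySem.Chars.lower path.toList) []
  simp only [List.flatMap_nil, List.append_nil] at htext
  rw [htext, pv_infix_glue t (hterms t ht) _ _]
  constructor
  · rintro (hi | ⟨b, hb, hi⟩)
    · exact ⟨PySem.Chars.lower path.toList, List.mem_cons_self, (PySem.Chars.isIn_iff_infix _ _).mpr hi⟩
    · exact ⟨b, List.mem_cons_of_mem _ hb, (PySem.Chars.isIn_iff_infix _ _).mpr hi⟩
  · rintro ⟨b, hb, hin⟩
    rcases List.mem_cons.mp hb with rfl | hb
    · exact Or.inl ((PySem.Chars.isIn_iff_infix _ _).mp hin)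
    · exact Or.inr ⟨b, hb, (PySem.Chars.isIn_iff_infix _ _).mp hin⟩

-- ===== VERDICT (by name: the statement is the Claim_ definition above) =====
theorem search_paths_spec : Claim_equal_search_paths := by
  intro spec query _ _
  unfold Spec_search_paths search_paths search_paths_alt
  cases hp : dget? spec "paths" with
  | none => rfl
  | some paths =>
    simp only
    rw [PySem.List.foldl_append_if
      (p := fun (pm : String × List (String × List (String × String))) => ((PySem.Chars.split₀ query.toList).map PySem.Chars.lower).all
        (fun term => PySem.Chars.isIn term
          (pm.2.foldl (fun st md =>
            if md.1 ∈ (["get", "post", "put", "delete", "patch"] : List String) then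
              st ++ ' ' :: PySem.Chars.lower (dgetD md.2 "summary" "").toList
                 ++ ' ' :: PySem.Chars.lower (dgetD md.2 "description" "").toList
                 ++ ' ' :: PySem.Chars.lower (dgetD md.2 "operationId" "").toList
            else st) (PySem.Chars.lower pm.1.toList))))
      (f := fun (pm : String × List (String × List (String × String))) => (pm.1, pm.2, "matched"))]
    rw [List.nil_append]
    congr 1
    refine List.filter_congr (fun pm _ => ?_)
    exact pv_pred_eq _ (pv_terms_no_space query) pm.1 pm.2
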